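-- pv_equiv track=rewrite | github.com/Shilenkovv/Algorithms_PyGen_bg | 8_simple_sorting_algorithms/8_4_9.py | max_common_sum
-- ===== SOURCE A (Python) =====
-- def max_common_sum(nums: list[int]) -> int:
--     counts = [0] * 19
--
--     for elem in nums:
--         two_dig = elem % 100
--         counts[two_dig % 10 + two_dig // 10] += 1
--
--     max_sum = -float('inf')
--     max_cnt = -float('inf')
--     for i in range(len(counts)):
--         if counts[i] and counts[i] >= max_cnt:
--             max_cnt = counts[i]
--             max_sum = i
--     return max_sum
-- ===== SOURCE B (Python) =====
-- def max_common_sum(nums: list[int]) -> int: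
--     s = sorted((e % 100) % 10 + (e % 100) // 10 for e in nums)
--     best = None
--     best_len = 0
--     run_val = None
--     run_len = 0
--     for v in s:
--         if v == run_val:
--             run_len += 1
--         else:
--             run_val = v
--             run_len = 1
--         if run_len >= best_len:
--             best = run_val
--             best_len = run_len
--     return best
-- ===== Notes on version B (the rewrite author's own statement) =====
-- stated objective: alternative
-- what changed: B sorts the digit sums and makes one run-length scan over the sorted list, keeping the longest run (ties to the later, larger value), instead of A's 19-slot counting array followed by an argmax scan with -inf sentinels.
-- outside the precondition, e.g. on max_common_sum([]): A returns -inf, B returns None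
import Mathlib
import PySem

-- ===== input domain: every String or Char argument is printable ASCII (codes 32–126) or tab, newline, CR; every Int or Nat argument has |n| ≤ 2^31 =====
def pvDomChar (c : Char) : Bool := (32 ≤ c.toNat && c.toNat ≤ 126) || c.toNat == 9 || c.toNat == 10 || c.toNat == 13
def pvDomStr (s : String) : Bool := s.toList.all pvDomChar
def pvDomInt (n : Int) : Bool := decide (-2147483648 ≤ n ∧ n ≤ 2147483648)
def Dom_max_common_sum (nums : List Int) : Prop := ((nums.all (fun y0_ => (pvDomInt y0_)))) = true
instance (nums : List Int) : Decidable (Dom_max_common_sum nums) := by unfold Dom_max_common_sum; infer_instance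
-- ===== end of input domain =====

-- B replaces A's 19-slot counting array and argmax scan by sorting the digit sums and scanning
-- consecutive runs once, keeping the best run (ties go to the later, larger value) — an
-- alternative sort-then-group algorithm; equivalence is about the return value only.

-- ===== PORT A =====
def max_common_sum (nums : List Int) : Int :=
  let counts : List Int := List.replicate 19 0
  let counts := nums.foldl (fun counts elem =>
    let twoDig := PySem.Int.mod elem 100
    PySem.List.pySetD counts (PySem.Int.mod twoDig 10 + PySem.Int.floordiv twoDig 10)
      (PySem.List.pyGetD counts (PySem.Int.mod twoDig 10 + PySem.Int.floordiv twoDig 10) 0 + 1)) counts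
  let fin := (PySem.List.pyRange 0 (PySem.List.len counts) 1).foldl
    (fun (st : Option Int × Option Int) i =>
      let c := PySem.List.pyGetD counts i 0
      match st with
      | (ms, none) => if c ≠ 0 then (some i, some c) else (ms, none)
      | (ms, some mc) => if c ≠ 0 ∧ mc ≤ c then (some i, some c) else (ms, some mc))
    (none, none)
  -- when nums = [] Python A returns -float('inf'), a float, not an int; excluded by Pre_
  fin.1.getD 0

-- ===== PORT B =====
def max_common_sum_alt (nums : List Int) : Int :=
  let s := PySem.List.sorted (nums.map (fun e =>
    PySem.Int.mod (PySem.Int.mod e 100) 10 + PySem.Int.floordiv (PySem.Int.mod e 100) 10))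
    (fun x => x) false
  -- state (best, best_len, run_val, run_len)
  let fin := s.foldl (fun (st : Option Int × Int × Option Int × Int) v =>
      let rv := if some v = st.2.2.1 then (st.2.2.1, st.2.2.2 + 1) else (some v, (1 : Int))
      if rv.2 ≥ st.2.1 then (rv.1, rv.2, rv.1, rv.2) else (st.1, st.2.1, rv.1, rv.2))
    (none, 0, none, 0)
  -- Python B returns None (best) on the empty list; excluded by Pre_
  fin.1.getD 0

-- ===== PRECONDITION & SPEC =====
-- Pre_ excludes only the empty list, on which A returns -float('inf') (a float, not a value
-- of the declared int type) and B returns None.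
def Pre_max_common_sum (nums : List Int) : Prop := nums ≠ []
instance (nums : List Int) : Decidable (Pre_max_common_sum nums) := by unfold Pre_max_common_sum; infer_instance
def pvWitness_max_common_sum : List Int := [5, 123]
def Spec_max_common_sum (nums : List Int) (out : Int) : Prop := out = max_common_sum_alt nums
instance (nums : List Int) (out : Int) : Decidable (Spec_max_common_sum nums out) := by unfold Spec_max_common_sum; infer_instance

-- ===== CLAIM (what is proved, stated in full; the proofs are below) =====
def Claim_equal_max_common_sum : Prop := ∀ (nums : List Int), Dom_max_common_sum nums → Pre_max_common_sum nums → Spec_max_common_sum nums (max_common_sum nums)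

-- ===== LEMMAS AND PROOFS =====

-- the digit sum of elem % 100, shared shape of both ports' arithmetic
def pvF (e : Int) : Int :=
  PySem.Int.mod (PySem.Int.mod e 100) 10 + PySem.Int.floordiv (PySem.Int.mod e 100) 10

lemma pvF_bounds (e : Int) : 0 ≤ pvF e ∧ pvF e < 19 := by
  have h1 : 0 ≤ PySem.Int.mod e 100 := PySem.Int.mod_nonneg e (by norm_num)
  have h2 : PySem.Int.mod e 100 < 100 := PySem.Int.mod_lt e (by norm_num)
  have e1 : PySem.Int.mod (PySem.Int.mod e 100) 10 = (PySem.Int.mod e 100) % 10 :=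
    PySem.Int.mod_eq_emod_of_pos (by norm_num)
  have e2 : PySem.Int.floordiv (PySem.Int.mod e 100) 10 = (PySem.Int.mod e 100) / 10 :=
    PySem.Int.floordiv_eq_ediv_of_pos (by norm_num)
  unfold pvF
  rw [e1, e2]
  omega

-- body of A's counting loop (definitionally the lambda in the port)
def pvBodyA (counts : List Int) (elem : Int) : List Int :=
  let twoDig := PySem.Int.mod elem 100
  PySem.List.pySetD counts (PySem.Int.mod twoDig 10 + PySem.Int.floordiv twoDig 10)
    (PySem.List.pyGetD counts (PySem.Int.mod twoDig 10 + PySem.Int.floordiv twoDig 10) 0 + 1)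

lemma pvBodyA_foldl : ∀ (l : List Int) (c : List Int), c.length = 19 →
    (l.foldl pvBodyA c).length = 19 ∧
    ∀ i : Int, 0 ≤ i →
      PySem.List.pyGetD (l.foldl pvBodyA c) i 0
        = PySem.List.pyGetD c i 0 + ((l.map pvF).count i : Int) := by
  intro l
  induction l with
  | nil => intro c hc; exact ⟨hc, by simp⟩
  | cons x t ih =>
    intro c hc
    have hb := pvF_bounds x
    have hidx : (pvF x).toNat < c.length := by omega
    have hset0 : pvBodyA c x = PySem.List.pySetD c (pvF x) (PySem.List.pyGetD c (pvF x) 0 + 1) := rfl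
    have hset : pvBodyA c x = c.set (pvF x).toNat (PySem.List.pyGetD c (pvF x) 0 + 1) := by
      rw [hset0]
      exact PySem.List.pySetD_of_nonneg _ _ hb.1
    have hlen : (pvBodyA c x).length = 19 := by rw [hset]; simpa using hc
    obtain ⟨hl, hg⟩ := ih (pvBodyA c x) hlen
    refine ⟨by simpa using hl, ?_⟩
    intro i hi
    have hstep : ∀ j : Int, 0 ≤ j → PySem.List.pyGetD (pvBodyA c x) j 0
        = if j = pvF x then PySem.List.pyGetD c (pvF x) 0 + 1 else PySem.List.pyGetD c j 0 := by
      intro j hj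
      have hjc : ((j.toNat : Nat) : Int) = j := Int.toNat_of_nonneg hj
      have hpc : (((pvF x).toNat : Nat) : Int) = pvF x := Int.toNat_of_nonneg hb.1
      have h := PySem.List.pyGetD_pySetD_natCast (xs := c) (n := (pvF x).toNat)
        (v := PySem.List.pyGetD c (pvF x) 0 + 1) (m := j.toNat) (d := 0) hidx
      rw [hpc, hjc] at h
      rw [hset0, h]
      by_cases hxi : j = pvF x
      · simp [hxi]
      · have hn : ¬ (j.toNat = (pvF x).toNat) := by omega
        simp [hxi, hn]
    have hcount : ((x :: t).map pvF).count i = (t.map pvF).count i + if pvF x = i then 1 else 0 := by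
      simp [List.count_cons]
    rw [List.foldl_cons, hg i hi, hstep i hi, hcount]
    by_cases hxi : i = pvF x
    · subst hxi; simp; ring
    · have : ¬ (pvF x = i) := fun h => hxi h.symm
      simp [hxi, this]

-- body of A's selection loop (definitionally the lambda in the port)
def pvStepA (counts : List Int) (st : Option Int × Option Int) (i : Int) : Option Int × Option Int :=
  match st with
  | (ms, none) => if PySem.List.pyGetD counts i 0 ≠ 0
      then (some i, some (PySem.List.pyGetD counts i 0)) else (ms, none)
  | (ms, some mc) => if PySem.List.pyGetD counts i 0 ≠ 0 ∧ mc ≤ PySem.List.pyGetD counts i 0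
      then (some i, some (PySem.List.pyGetD counts i 0)) else (ms, some mc)

lemma pvLoopA (ca : List Int) (hnn : ∀ i : Int, 0 ≤ i → 0 ≤ PySem.List.pyGetD ca i 0) (k : Nat) :
    ((PySem.List.pyRange 0 (k : Int) 1).foldl (pvStepA ca) (none, none)
        = ((none : Option Int), (none : Option Int)) ∧
      ∀ i : Int, 0 ≤ i → i < (k : Int) → PySem.List.pyGetD ca i 0 = 0) ∨
    (∃ m : Int, 0 ≤ m ∧ m < (k : Int) ∧ PySem.List.pyGetD ca m 0 ≠ 0 ∧
      (PySem.List.pyRange 0 (k : Int) 1).foldl (pvStepA ca) (none, none)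
        = (some m, some (PySem.List.pyGetD ca m 0)) ∧
      (∀ i : Int, 0 ≤ i → i < (k : Int) → PySem.List.pyGetD ca i 0 ≤ PySem.List.pyGetD ca m 0) ∧
      (∀ i : Int, m < i → i < (k : Int) → PySem.List.pyGetD ca i 0 < PySem.List.pyGetD ca m 0)) := by
  induction k with
  | zero =>
    left
    constructor
    · rw [PySem.List.pyRange_one_eq_nil (by norm_num)]; rfl
    · intro i h1 h2; omega
  | succ k ih =>
    have hsplit : PySem.List.pyRange 0 ((k + 1 : Nat) : Int) 1
        = PySem.List.pyRange 0 (k : Int) 1 ++ [(k : Int)] := by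
      push_cast
      exact PySem.List.pyRange_one_succ_right (by positivity)
    rw [hsplit, List.foldl_append, List.foldl_cons, List.foldl_nil]
    have hknn : 0 ≤ PySem.List.pyGetD ca (k : Int) 0 := hnn _ (by positivity)
    rcases ih with ⟨heq, hzero⟩ | ⟨m, hm0, hmk, hmne, heq, hle, hlt⟩
    · rw [heq]
      by_cases hc : PySem.List.pyGetD ca (k : Int) 0 ≠ 0
      · have hstep : pvStepA ca ((none : Option Int), (none : Option Int)) (k : Int)
            = (some (k : Int), some (PySem.List.pyGetD ca (k : Int) 0)) := by
          simp only [pvStepA]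
          rw [if_pos hc]
        rw [hstep]
        right
        refine ⟨(k : Int), by positivity, by push_cast; omega, hc, rfl, ?_, ?_⟩
        · intro i h1 h2
          by_cases hik : i < (k : Int)
          · rw [hzero i h1 hik]; omega
          · have : i = (k : Int) := by push_cast at h2; omega
            rw [this]
        · intro i h1 h2; push_cast at h2; omega
      · have hstep : pvStepA ca ((none : Option Int), (none : Option Int)) (k : Int)
            = ((none : Option Int), (none : Option Int)) := by
          simp only [pvStepA]
          rw [if_neg hc]
        rw [hstep]
        left
        refine ⟨rfl, ?_⟩
        intro i h1 h2
        by_cases hik : i < (k : Int)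
        · exact hzero i h1 hik
        · have : i = (k : Int) := by push_cast at h2; omega
          rw [this]; omega
    · rw [heq]
      by_cases hc : PySem.List.pyGetD ca (k : Int) 0 ≠ 0 ∧
          PySem.List.pyGetD ca m 0 ≤ PySem.List.pyGetD ca (k : Int) 0
      · have hstep : pvStepA ca (some m, some (PySem.List.pyGetD ca m 0)) (k : Int)
            = (some (k : Int), some (PySem.List.pyGetD ca (k : Int) 0)) := by
          simp only [pvStepA]
          rw [if_pos hc]
        rw [hstep]
        right
        refine ⟨(k : Int), by positivity, by push_cast; omega, hc.1, rfl, ?_, ?_⟩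
        · intro i h1 h2
          by_cases hik : i < (k : Int)
          · exact le_trans (hle i h1 hik) hc.2
          · have : i = (k : Int) := by push_cast at h2; omega
            rw [this]
        · intro i h1 h2; push_cast at h2; omega
      · have hstep : pvStepA ca (some m, some (PySem.List.pyGetD ca m 0)) (k : Int)
            = (some m, some (PySem.List.pyGetD ca m 0)) := by
          simp only [pvStepA]
          rw [if_neg hc]
        rw [hstep]
        have hknot : PySem.List.pyGetD ca (k : Int) 0 < PySem.List.pyGetD ca m 0 := by
          by_cases h0 : PySem.List.pyGetD ca (k : Int) 0 = 0
          · have := hnn m hm0; omega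
          · have h1 : ¬ PySem.List.pyGetD ca m 0 ≤ PySem.List.pyGetD ca (k : Int) 0 := by
              intro hle'
              exact hc ⟨h0, hle'⟩
            omega
        right
        refine ⟨m, hm0, by push_cast; omega, hmne, rfl, ?_, ?_⟩
        · intro i h1 h2
          by_cases hik : i < (k : Int)
          · exact hle i h1 hik
          · have : i = (k : Int) := by push_cast at h2; omega
            rw [this]; omega
        · intro i h1 h2
          by_cases hik : i < (k : Int)
          · exact hlt i h1 hik
          · have : i = (k : Int) := by push_cast at h2; omega
            rw [this]; omega

lemma pvGetD_replicate (i : Int) (hi : 0 ≤ i) :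
    PySem.List.pyGetD (List.replicate 19 (0 : Int)) i 0 = 0 := by
  by_cases h19 : i < 19
  · rw [PySem.List.pyGetD_eq_getElem _ _ hi (by simpa using h19)]
    simp only [List.getElem_replicate]
  · have hnone : PySem.List.pyGet? (List.replicate 19 (0 : Int)) i = none := by
      rw [PySem.List.pyGet?_eq_none_iff]
      intro hr
      rcases hr with ⟨h1, h2⟩
      simp at h2
      omega
    rw [PySem.List.pyGetD_of_none _ _ _ hnone]

-- body of B's run-scanning loop (definitionally the lambda in the port)
def pvStepB (st : Option Int × Int × Option Int × Int) (v : Int) : Option Int × Int × Option Int × Int :=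
  let rv := if some v = st.2.2.1 then (st.2.2.1, st.2.2.2 + 1) else (some v, (1 : Int))
  if rv.2 ≥ st.2.1 then (rv.1, rv.2, rv.1, rv.2) else (st.1, st.2.1, rv.1, rv.2)

-- "y's count-then-value key is ≤ b's" — the tie-break B's scan realises
def pvLex (l : List Int) (y b : Int) : Prop :=
  l.count y < l.count b ∨ (l.count y = l.count b ∧ y ≤ b)

lemma pvScan : ∀ (l : List Int), l.Pairwise (· ≤ ·) → l ≠ [] →
    ∃ b r, l.foldl pvStepB (none, 0, none, 0)
        = (some b, ((l.count b : Nat) : Int), some r, ((l.count r : Nat) : Int)) ∧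
      b ∈ l ∧ r ∈ l ∧ (∀ y ∈ l, y ≤ r) ∧ (∀ y ∈ l, pvLex l y b) := by
  intro l
  induction l using List.reverseRecOn with
  | nil => intro _ h; exact absurd rfl h
  | append_singleton l x ih =>
    intro hs _
    have hps := (List.pairwise_append.mp hs)
    have hx : ∀ y ∈ l, y ≤ x := fun y hy => hps.2.2 y hy x (by simp)
    have hcnt : ∀ y : Int, (l ++ [x]).count y = l.count y + if y = x then 1 else 0 := by
      intro y
      by_cases h : y = x
      · subst h; simp [List.count_append]
      · rw [List.count_append, if_neg h]
        have : (List.count y [x]) = 0 := List.count_eq_zero.mpr (by simp [h])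
        omega
    by_cases hl : l = []
    · subst hl
      refine ⟨x, x, ?_, by simp, by simp, by simp, ?_⟩
      · simp [pvStepB]
      · intro y hy
        simp at hy
        subst hy
        exact Or.inr ⟨rfl, le_refl _⟩
    · obtain ⟨b, r, heq, hb, hr, hrmax, hlex⟩ := ih hps.1 hl
      have hcb1 : 1 ≤ l.count b := List.count_pos_iff.mpr hb
      rw [List.foldl_append, heq, List.foldl_cons, List.foldl_nil]
      by_cases hxr : x = r
      · -- x extends the current run (r is replaced by x below)
        subst hxr
        have hstep : pvStepB (some b, ((l.count b : Nat) : Int), some x, ((l.count x : Nat) : Int)) x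
            = if ((l.count x : Nat) : Int) + 1 ≥ ((l.count b : Nat) : Int)
                then (some x, ((l.count x : Nat) : Int) + 1, some x, ((l.count x : Nat) : Int) + 1)
                else (some b, ((l.count b : Nat) : Int), some x, ((l.count x : Nat) : Int) + 1) := by
          simp [pvStepB, ge_iff_le]
        have hcx'' : (l ++ [x]).count x = l.count x + 1 := by rw [hcnt x]; simp
        have hcx' : (((l ++ [x]).count x : Nat) : Int) = ((l.count x : Nat) : Int) + 1 := by
          rw [hcx'']; push_cast; ring
        by_cases hge : ((l.count x : Nat) : Int) + 1 ≥ ((l.count b : Nat) : Int)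
        · rw [hstep, if_pos hge]
          refine ⟨x, x, by rw [hcx'], by simp, by simp, ?_, ?_⟩
          · intro y hy
            rcases List.mem_append.mp hy with h | h
            · exact hrmax y h
            · simp at h; omega
          · intro y hy
            unfold pvLex
            rcases List.mem_append.mp hy with h | h
            · have hyr : y ≤ x := hrmax y h
              have hyc : l.count y ≤ l.count b := by
                rcases hlex y h with h' | ⟨h', _⟩ <;> omega
              by_cases hry : y = x
              · subst hry
                exact Or.inr ⟨rfl, le_refl _⟩
              · rw [hcnt y, if_neg hry, hcx'']
                by_cases hlt2 : l.count y < l.count x + 1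
                · exact Or.inl (by omega)
                · exact Or.inr ⟨by omega, hyr⟩
            · simp at h; subst h
              exact Or.inr ⟨rfl, le_refl _⟩
        · rw [hstep, if_neg hge]
          have hbr : b ≠ x := by
            intro hbr
            subst hbr
            omega
          have hcb'' : (l ++ [x]).count b = l.count b := by
            rw [hcnt b, if_neg hbr]; omega
          refine ⟨b, x, by rw [hcx'', hcb'']; push_cast; rfl, List.mem_append_left _ hb, by simp, ?_, ?_⟩
          · intro y hy
            rcases List.mem_append.mp hy with h | h
            · exact hrmax y h
            · simp at h; omega
          · intro y hy
            unfold pvLex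
            rw [hcb'']
            rcases List.mem_append.mp hy with h | h
            · by_cases hry : y = x
              · subst hry
                rw [hcx'']
                exact Or.inl (by omega)
              · rw [hcnt y, if_neg hry]
                rcases hlex y h with h' | ⟨h', h''⟩
                · exact Or.inl (by omega)
                · exact Or.inr ⟨by omega, h''⟩
            · simp at h; subst h
              rw [hcx'']
              exact Or.inl (by omega)
      · -- x starts a new run; x ∉ l
        have hxnotl : x ∉ l := by
          intro hxl
          exact hxr (le_antisymm (hrmax x hxl) (hx r hr))
        have hcxl : l.count x = 0 := List.count_eq_zero.mpr hxnotl
        have hcx' : (l ++ [x]).count x = 1 := by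
          rw [hcnt x]; simp [hcxl]
        have hstep : pvStepB (some b, ((l.count b : Nat) : Int), some r, ((l.count r : Nat) : Int)) x
            = if (1 : Int) ≥ ((l.count b : Nat) : Int)
                then (some x, 1, some x, 1)
                else (some b, ((l.count b : Nat) : Int), some x, 1) := by
          simp [pvStepB, hxr, ge_iff_le]
        by_cases hge : (1 : Int) ≥ ((l.count b : Nat) : Int)
        · rw [hstep, if_pos hge]
          have hcb1' : l.count b = 1 := by omega
          refine ⟨x, x, by rw [hcx']; norm_num, by simp, by simp, ?_, ?_⟩
          · intro y hy
            rcases List.mem_append.mp hy with h | h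
            · exact hx y h
            · simp at h; omega
          · intro y hy
            unfold pvLex
            rw [hcx']
            rcases List.mem_append.mp hy with h | h
            · have hyx : y ≤ x := hx y h
              have hyc : l.count y ≤ 1 := by
                rcases hlex y h with h' | ⟨h', _⟩ <;> omega
              have hxy : y ≠ x := fun hxy => hxnotl (hxy ▸ h)
              rw [hcnt y, if_neg hxy]
              by_cases h0 : l.count y = 0
              · exact Or.inl (by omega)
              · exact Or.inr ⟨by omega, hyx⟩
            · simp at h; subst h
              exact Or.inr ⟨hcx', le_refl _⟩
        · rw [hstep, if_neg hge]
          have hbx : b ≠ x := fun hbx => hxnotl (hbx ▸ hb)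
          have hcb'' : (l ++ [x]).count b = l.count b := by
            rw [hcnt b, if_neg hbx]; omega
          refine ⟨b, x, by rw [hcb'', hcx']; norm_num, List.mem_append_left _ hb, by simp, ?_, ?_⟩
          · intro y hy
            rcases List.mem_append.mp hy with h | h
            · exact hx y h
            · simp at h; omega
          · intro y hy
            unfold pvLex
            rw [hcb'']
            rcases List.mem_append.mp hy with h | h
            · have hxy : y ≠ x := fun hxy => hxnotl (hxy ▸ h)
              rw [hcnt y, if_neg hxy]
              exact hlex y h
            · simp at h; subst h
              rw [hcx']
              exact Or.inl (by omega)

-- ===== VERDICT (by name: the statement is the Claim_ definition above) =====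
theorem max_common_sum_spec : Claim_equal_max_common_sum := by
  intro nums _hdom hpre
  unfold Spec_max_common_sum
  obtain ⟨n0, t, rfl⟩ := List.exists_cons_of_ne_nil hpre
  set nums := n0 :: t with hnums
  set sums := nums.map pvF with hsums
  set ca := nums.foldl pvBodyA (List.replicate 19 (0 : Int)) with hca
  -- A's port, with its loop bodies named
  have hA : max_common_sum nums
      = ((PySem.List.pyRange 0 (PySem.List.len ca) 1).foldl (pvStepA ca) (none, none)).1.getD 0 := rfl
  -- B's port, with its loop body named
  have hB : max_common_sum_alt nums
      = ((PySem.List.sorted sums (fun x => x) false).foldl pvStepB (none, 0, none, 0)).1.getD 0 := rfl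
  obtain ⟨hlen, hget0⟩ := pvBodyA_foldl nums (List.replicate 19 0) (by simp)
  have hget : ∀ i : Int, 0 ≤ i → PySem.List.pyGetD ca i 0 = (sums.count i : Int) := by
    intro i hi
    rw [hca, hget0 i hi, pvGetD_replicate i hi]
    simp [hsums]
  have hnn : ∀ i : Int, 0 ≤ i → 0 ≤ PySem.List.pyGetD ca i 0 := by
    intro i hi; rw [hget i hi]; exact Int.natCast_nonneg _
  have hlen' : PySem.List.len ca = (19 : Int) := by
    rw [PySem.List.len_eq, hca, hlen]; rfl
  rw [hlen'] at hA
  have hloop := pvLoopA ca hnn 19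
  norm_num at hloop
  have hmem0 : pvF n0 ∈ sums := by simp [hsums, hnums]
  have hb0 := pvF_bounds n0
  have hc0 : 0 < sums.count (pvF n0) := List.count_pos_iff.mpr hmem0
  rcases hloop with ⟨_, hzero⟩ | ⟨m, hm0, hm19, hmne, heqA, hle, hlt⟩
  · exfalso
    have := hzero (pvF n0) hb0.1 hb0.2
    rw [hget _ hb0.1] at this
    omega
  · rw [heqA] at hA
    simp only [Option.getD_some] at hA
    -- B side: the run scan over the sorted digit sums
    have hpair : (PySem.List.sorted sums (fun x => x) false).Pairwise (· ≤ ·) := by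
      simpa using PySem.List.sorted_pairwise (xs := sums) (key := fun x => x)
    have hsne : PySem.List.sorted sums (fun x => x) false ≠ [] := by
      rw [Ne, PySem.List.sorted_eq_nil_iff]
      simp [hsums, hnums]
    obtain ⟨b, r, heqB, hbmem, _, _, hlexAll⟩ :=
      pvScan (PySem.List.sorted sums (fun x => x) false) hpair hsne
    rw [heqB] at hB
    simp only [Option.getD_some] at hB
    -- translate B's facts into counts over sums
    have hperm : (PySem.List.sorted sums (fun x => x) false).Perm sums :=
      PySem.List.sorted_perm sums (fun x => x) false
    have hcnteq : ∀ y : Int, (PySem.List.sorted sums (fun x => x) false).count y = sums.count y :=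
      fun y => hperm.count_eq y
    have hbmem' : b ∈ sums := (PySem.List.mem_sorted sums (fun x => x) false b).mp hbmem
    have hbnd : ∀ y ∈ sums, 0 ≤ y ∧ y < 19 := by
      intro y hy
      rw [hsums] at hy
      obtain ⟨e, _, rfl⟩ := List.mem_map.mp hy
      exact pvF_bounds e
    have hb' := hbnd b hbmem'
    have hmmem : m ∈ sums := by
      have := hget m hm0
      refine List.count_pos_iff.mp ?_
      omega
    have hlex := hlexAll m ((PySem.List.mem_sorted sums (fun x => x) false m).mpr hmmem)
    unfold pvLex at hlex
    rw [hcnteq m, hcnteq b] at hlex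
    have h1 : (sums.count b : Int) ≤ (sums.count m : Int) := by
      have := hle b hb'.1 hb'.2
      rw [hget b hb'.1, hget m hm0] at this
      exact_mod_cast this
    have hfin : m = b := by
      by_contra hne'
      rcases hlex with h | ⟨hceq, hmle⟩
      · omega
      · have hlt' : m < b := lt_of_le_of_ne hmle hne'
        have := hlt b hlt' hb'.2
        rw [hget b hb'.1, hget m hm0] at this
        omega
    rw [hA, hB, hfin]
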